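-- pv_equiv track=rewrite | github.com/vilipche/sequence-alignment-project | DIST_1.py | align_lettre_mot
-- ===== SOURCE A (Python) =====
-- def c_sub(x,y):
--     if(x==y):
--         return 0
--     elif((x=="A" and y=="T") or (y=="A" and x=="T") or (x=="G" and y=="C") or (y=="G" and x=="C")):
--         return 3
--     else:
--         return 4
--
-- def mot_gaps(k):
--     return ['-'] * k
--
-- def align_lettre_mot(x,y):
--     mot_x = mot_gaps(len(y))
--     cout = float("inf")
--     indice = 0
--     for i in range(len(y)):
--         if(x==y[i]): #si a=b
--             indice = i
--             break
--         else:
--             if(c_sub(x,y[i])<cout):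
--                 cout=c_sub(x,y[i])
--                 indice = i
--
--     mot_x[indice] = x
--     return mot_x, y
-- ===== SOURCE B (Python) =====
-- def c_sub(x, y):
--     if x == y:
--         return 0
--     elif (x == "A" and y == "T") or (y == "A" and x == "T") or (x == "G" and y == "C") or (y == "G" and x == "C"):
--         return 3
--     else:
--         return 4
--
-- def align_lettre_mot(x, y):
--     costs = [c_sub(x, yi) for yi in y]
--     indice = costs.index(min(costs))
--     mot_x = ['-'] * len(y)
--     mot_x[indice] = x
--     return mot_x, y
-- ===== Notes on version B (the rewrite author's own statement) =====
-- stated objective: simpler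
-- what changed: Replaces the single-pass running-min loop with an early break by building the full cost table once and taking costs.index(min(costs)); correct because an exact match has cost 0, the global minimum, whose first occurrence equals A's break index.
import Mathlib
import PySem

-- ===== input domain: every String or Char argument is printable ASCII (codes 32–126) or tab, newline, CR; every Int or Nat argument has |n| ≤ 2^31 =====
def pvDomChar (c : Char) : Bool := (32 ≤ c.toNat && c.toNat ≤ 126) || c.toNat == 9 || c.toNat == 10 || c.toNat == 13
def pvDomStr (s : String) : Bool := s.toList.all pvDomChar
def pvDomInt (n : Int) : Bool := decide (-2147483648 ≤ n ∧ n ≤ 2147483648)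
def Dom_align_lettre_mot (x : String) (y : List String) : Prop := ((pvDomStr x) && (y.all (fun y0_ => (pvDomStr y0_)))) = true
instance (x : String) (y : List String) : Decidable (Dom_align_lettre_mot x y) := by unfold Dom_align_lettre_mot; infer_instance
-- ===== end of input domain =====

-- B is a simpler decomposition: build the full cost table, then take the first index of its
-- minimum, instead of A's running-min loop with an early break on exact match.

-- ===== PORT A =====
-- helper c_sub from the module (shared source-level helper; each port calls it as its Python does)
def c_sub (x y : String) : Int :=
  if x == y then 0
  else if (x == "A" && y == "T") || (y == "A" && x == "T") ||
          (x == "G" && y == "C") || (y == "G" && x == "C") then 3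
  else 4

def mot_gaps (k : Nat) : List String := List.replicate k "-"

-- A's for-loop with break: state (cout, indice); cout = none models float("inf")
def alm_loop (x : String) : List String → Nat → Option Int → Nat → Nat
  | [], _, _, ind => ind
  | yi :: rest, i, cout, ind =>
    if x == yi then i
    else if (match cout with | none => true | some c => c_sub x yi < c) then
      alm_loop x rest (i + 1) (some (c_sub x yi)) i
    else
      alm_loop x rest (i + 1) cout ind

def align_lettre_mot (x : String) (y : List String) : List String × List String :=
  let mot_x := mot_gaps y.length
  let indice := alm_loop x y 0 none 0
  (mot_x.set indice x, y)   -- mot_x[indice] = x (in range whenever y ≠ []; empty y raises, excluded by Pre_)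

-- ===== PORT B =====
def c_sub_b (x y : String) : Int :=
  if x == y then 0
  else if (x == "A" && y == "T") || (y == "A" && x == "T") ||
          (x == "G" && y == "C") || (y == "G" && x == "C") then 3
  else 4

def align_lettre_mot_alt (x : String) (y : List String) : List String × List String :=
  let costs := y.map (fun yi => c_sub_b x yi)
  -- min(costs) then costs.index(...): both are some whenever y ≠ [] (empty y raises, excluded by Pre_)
  let indice := (PySem.List.index? costs ((PySem.List.min? costs (fun v => v)).getD 0)).getD 0
  let mot_x := List.replicate y.length "-"
  (mot_x.set indice x, y)

-- ===== PRECONDITION & SPEC =====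
-- Pre_ excludes y = [], on which A raises IndexError (mot_x[0] on []) and B raises ValueError (min of []).
def Pre_align_lettre_mot (x : String) (y : List String) : Prop := y ≠ []
instance (x : String) (y : List String) : Decidable (Pre_align_lettre_mot x y) := by unfold Pre_align_lettre_mot; infer_instance
def pvWitness_align_lettre_mot : String × List String := ("A", ["G", "T"])

def Spec_align_lettre_mot (x : String) (y : List String) (out : List String × List String) : Prop := out = align_lettre_mot_alt x y
instance (x : String) (y : List String) (out : List String × List String) : Decidable (Spec_align_lettre_mot x y out) := by unfold Spec_align_lettre_mot; infer_instance

-- ===== CLAIM (what is proved, stated in full; the proofs are below) =====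
def Claim_equal_align_lettre_mot : Prop := ∀ (x : String) (y : List String), Dom_align_lettre_mot x y → Pre_align_lettre_mot x y → Spec_align_lettre_mot x y (align_lettre_mot x y)

-- ===== LEMMAS AND PROOFS =====

-- first-argmin of a cost list, right to left: (minimum value, index of its first occurrence)
def fm : List Int → Option (Int × Nat)
  | [] => none
  | c :: cs =>
    match fm cs with
    | none => some (c, 0)
    | some (m, j) => if c ≤ m then some (c, 0) else some (m, j + 1)

lemma c_sub_nonneg (x y : String) : 0 ≤ c_sub x y := by
  unfold c_sub; split_ifs <;> norm_num

lemma c_sub_pos_of_ne (x y : String) (h : (x == y) = false) : 0 < c_sub x y := by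
  unfold c_sub
  rw [h]
  simp only [Bool.false_eq_true, if_false]
  split_ifs <;> norm_num

lemma c_sub_eq_c_sub_b (x y : String) : c_sub x y = c_sub_b x y := rfl

lemma fm_nonneg (x : String) : ∀ (ys : List String) (m : Int) (j : Nat),
    fm (ys.map (c_sub x)) = some (m, j) → 0 ≤ m := by
  intro ys
  induction ys with
  | nil => intro m j h; simp [fm] at h
  | cons yh t ih =>
    intro m j h
    simp only [List.map, fm] at h
    cases hfm : fm (t.map (c_sub x)) with
    | none =>
      rw [hfm] at h; simp at h
      exact h.1 ▸ c_sub_nonneg x yh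
    | some p =>
      rw [hfm] at h
      obtain ⟨m', j'⟩ := p
      by_cases hle : c_sub x yh ≤ m'
      · simp [hle] at h; exact h.1 ▸ c_sub_nonneg x yh
      · simp [hle] at h; exact h.1 ▸ (ih m' j' hfm)

-- A's loop after the first update: state (some c, ind) with 0 < c is replaced by the
-- first-argmin of the remaining costs iff that minimum is strictly smaller.
lemma alm_loop_some (x : String) : ∀ (rest : List String) (i : Nat) (c : Int) (ind : Nat),
    0 < c →
    alm_loop x rest i (some c) ind =
      (match fm (rest.map (c_sub x)) with
       | none => ind
       | some (m, j) => if m < c then i + j else ind) := by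
  intro rest
  induction rest with
  | nil => intro i c ind _; simp [alm_loop, fm]
  | cons yh t ih =>
    intro i c ind hc
    by_cases hx : (x == yh) = true
    · -- break: c_sub x yh = 0
      have hcs : c_sub x yh = 0 := by unfold c_sub; rw [hx]; rfl
      simp only [alm_loop, hx, if_true, List.map, fm]
      cases hfm : fm (t.map (c_sub x)) with
      | none => simp [hcs, hc]
      | some p =>
        obtain ⟨m', j'⟩ := p
        have hm' : 0 ≤ m' := fm_nonneg x t m' j' hfm
        simp [hcs, hm', hc]
    · have hx' : (x == yh) = false := by simpa using hx
      have hpos : 0 < c_sub x yh := c_sub_pos_of_ne x yh hx'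
      simp only [alm_loop, hx', Bool.false_eq_true, if_false]
      by_cases hlt : c_sub x yh < c
      · rw [if_pos (by simpa using hlt)]
        rw [ih (i + 1) (c_sub x yh) i hpos]
        simp only [List.map, fm]
        cases hfm : fm (t.map (c_sub x)) with
        | none => simp [hlt]
        | some p =>
          obtain ⟨m', j'⟩ := p
          by_cases hle : c_sub x yh ≤ m'
          · have : ¬ m' < c_sub x yh := not_lt.mpr hle
            simp [hle, hlt, this]
          · have hml : m' < c_sub x yh := lt_of_not_ge hle
            have : m' < c := lt_trans hml hlt
            simp [hle, hml, this]
            ring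
      · rw [if_neg (by simpa using hlt)]
        rw [ih (i + 1) c ind hc]
        simp only [List.map, fm]
        cases hfm : fm (t.map (c_sub x)) with
        | none =>
          simp [show ¬ c_sub x yh < c from hlt]
        | some p =>
          obtain ⟨m', j'⟩ := p
          by_cases hle : c_sub x yh ≤ m'
          · have h1 : ¬ m' < c := by
              intro hmc; exact hlt (lt_of_le_of_lt hle hmc)
            simp [hle, h1, show ¬ c_sub x yh < c from hlt]
          · have hml : m' < c_sub x yh := lt_of_not_ge hle
            by_cases hmc : m' < c
            · simp [hle, hmc]; ring
            · simp [hle, hmc]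

lemma alm_loop_eq_fm (x : String) (y : List String) :
    alm_loop x y 0 none 0 =
      (match fm (y.map (c_sub x)) with
       | none => 0
       | some (_, j) => j) := by
  cases y with
  | nil => simp [alm_loop, fm]
  | cons yh t =>
    by_cases hx : (x == yh) = true
    · have hcs : c_sub x yh = 0 := by unfold c_sub; rw [hx]; rfl
      simp only [alm_loop, hx, if_true, List.map, fm]
      cases hfm : fm (t.map (c_sub x)) with
      | none => simp
      | some p =>
        obtain ⟨m', j'⟩ := p
        have hm' : 0 ≤ m' := fm_nonneg x t m' j' hfm
        simp [hcs, hm']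
    · have hx' : (x == yh) = false := by simpa using hx
      have hpos : 0 < c_sub x yh := c_sub_pos_of_ne x yh hx'
      simp only [alm_loop, hx', Bool.false_eq_true, if_false, if_pos]
      rw [alm_loop_some x t 1 (c_sub x yh) 0 hpos]
      simp only [List.map, fm]
      cases hfm : fm (t.map (c_sub x)) with
      | none => simp
      | some p =>
        obtain ⟨m', j'⟩ := p
        by_cases hle : c_sub x yh ≤ m'
        · simp [hle, not_lt.mpr hle]
        · have hml : m' < c_sub x yh := lt_of_not_ge hle
          simp [hle, hml]
          ring

-- running min equals fm's minimum
lemma foldl_min_fm : ∀ (cs : List Int) (c : Int),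
    List.foldl min c cs = (match fm cs with | none => c | some (m, _) => min c m) := by
  intro cs
  induction cs with
  | nil => intro c; simp [fm]
  | cons a t ih =>
    intro c
    simp only [List.foldl_cons, fm]
    rw [ih (min c a)]
    cases hfm : fm t with
    | none => simp
    | some p =>
      obtain ⟨m', j'⟩ := p
      by_cases hle : a ≤ m'
      · simp [hle, min_assoc]
      · have : m' < a := lt_of_not_ge hle
        simp [hle, min_assoc, min_eq_right (le_of_lt this)]

-- fm computes the minimum value
lemma fm_min : ∀ (cs : List Int) (m : Int) (j : Nat),
    fm cs = some (m, j) → PySem.List.min? cs (fun v => v) = some m := by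
  intro cs
  cases cs with
  | nil => intro m j h; simp [fm] at h
  | cons c t =>
    intro m j h
    rw [PySem.List.min?_id_cons]
    rw [foldl_min_fm t c]
    simp only [fm] at h
    cases hfm : fm t with
    | none => rw [hfm] at h; simp at h; simp [h.1]
    | some p =>
      rw [hfm] at h
      obtain ⟨m', j'⟩ := p
      by_cases hle : c ≤ m'
      · simp [hle] at h
        rw [← h.1]
        simp [min_eq_left hle]
      · simp [hle] at h
        have hml : m' < c := lt_of_not_ge hle
        rw [← h.1]
        simp [min_eq_right (le_of_lt hml)]

-- fm computes the first index of the minimum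
lemma fm_index : ∀ (cs : List Int) (m : Int) (j : Nat),
    fm cs = some (m, j) → PySem.List.index? cs m = some j := by
  intro cs
  induction cs with
  | nil => intro m j h; simp [fm] at h
  | cons c t ih =>
    intro m j h
    simp only [fm] at h
    cases hfm : fm t with
    | none =>
      rw [hfm] at h; simp at h
      rw [← h.1, ← h.2]
      exact PySem.List.index?_cons_self c t
    | some p =>
      rw [hfm] at h
      obtain ⟨m', j'⟩ := p
      by_cases hle : c ≤ m'
      · simp [hle] at h
        rw [← h.1, ← h.2]
        exact PySem.List.index?_cons_self c t
      · simp [hle] at h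
        have hml : m' < c := lt_of_not_ge hle
        rw [← h.1, ← h.2]
        have hne : c ≠ m' := ne_of_gt hml
        rw [PySem.List.index?_cons_of_ne t hne, ih m' j' hfm]
        rfl

lemma fm_ne_none_of_ne_nil (cs : List Int) (h : cs ≠ []) : fm cs ≠ none := by
  cases cs with
  | nil => exact absurd rfl h
  | cons c t =>
    simp only [fm]
    cases hfm : fm t with
    | none => simp
    | some p =>
      obtain ⟨m, j⟩ := p
      simp only
      split_ifs <;> simp

-- ===== VERDICT (by name: the statement is the Claim_ definition above) =====
theorem align_lettre_mot_spec : Claim_equal_align_lettre_mot := by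
  intro x y _ hpre
  unfold Spec_align_lettre_mot align_lettre_mot align_lettre_mot_alt mot_gaps
  simp only
  have hmap : y.map (fun yi => c_sub_b x yi) = y.map (c_sub x) := by
    simp [c_sub_eq_c_sub_b]
  rw [hmap]
  have hne : y.map (c_sub x) ≠ [] := by
    simpa using hpre
  cases hfm : fm (y.map (c_sub x)) with
  | none => exact absurd hfm (fm_ne_none_of_ne_nil _ hne)
  | some p =>
    obtain ⟨m, j⟩ := p
    rw [alm_loop_eq_fm, hfm, fm_min _ _ _ hfm]
    simp only [Option.getD_some]
    rw [fm_index _ _ _ hfm]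
    rfl
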